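-- pv_equiv track=rewrite | github.com/ElaYJ/Study_Python | Programmers/Level0/Day06.py | solution11
-- ===== SOURCE A (Python) =====
-- def solution11(l, r):
--     ret = []
--     def f(lim, val):
--         if lim == 0:
--             ret.append(val)
--             return
--
--         f(lim - 1, val * 10 + 5)
--         f(lim - 1, val * 10)
--
--     f(6, 0)
--
--     return list(i for i in ret if l <= i <= r)[::-1] or [-1]
-- ===== SOURCE B (Python) =====
-- def solution11(l, r):
--     # iterative cartesian build of all 6-digit {0,5} numbers, then sort-and-filter
--     cands = [0]
--     for _ in range(6):
--         cands = [v * 10 + d for v in cands for d in (0, 5)]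
--     res = [v for v in sorted(cands) if l <= v <= r]
--     return res if res else [-1]
-- ===== Notes on version B (the rewrite author's own statement) =====
-- stated objective: idiomatic
-- what changed: Replaces A's branch-first recursion with an appended-to closure list plus a [::-1] reversal by an iterative cartesian-product build of the 64 {0,5}-digit candidates followed by an explicit sort-then-filter pass.
import Mathlib
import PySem

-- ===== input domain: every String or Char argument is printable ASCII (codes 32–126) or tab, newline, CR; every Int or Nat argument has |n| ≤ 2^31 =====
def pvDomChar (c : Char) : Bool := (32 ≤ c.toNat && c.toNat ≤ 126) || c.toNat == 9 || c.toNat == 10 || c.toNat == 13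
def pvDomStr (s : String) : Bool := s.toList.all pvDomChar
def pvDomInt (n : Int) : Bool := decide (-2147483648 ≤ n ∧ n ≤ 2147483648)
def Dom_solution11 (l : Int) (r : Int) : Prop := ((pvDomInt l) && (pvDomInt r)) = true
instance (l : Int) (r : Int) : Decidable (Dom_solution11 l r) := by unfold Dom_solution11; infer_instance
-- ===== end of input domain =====

-- B replaces A's branch-first recursion plus [::-1] reversal by an iterative
-- cartesian build of the 64 candidates followed by sort-and-filter (objective: idiomatic).


-- ===== PORT A =====
-- the inner recursion f(lim, val): appends to ret (threaded as an accumulator)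
def solution11F : Nat → Int → List Int → List Int
  | 0, val, ret => ret ++ [val]
  | lim + 1, val, ret => solution11F lim (val * 10) (solution11F lim (val * 10 + 5) ret)

def solution11 (l : Int) (r : Int) : List Int :=
  let ret := solution11F 6 0 []
  -- list(i for i in ret if l <= i <= r)[::-1] or [-1]
  let rev := (ret.filter (fun i => decide (l ≤ i) && decide (i ≤ r))).reverse
  if rev.isEmpty then [-1] else rev

-- ===== PORT B =====
def solution11_alt (l : Int) (r : Int) : List Int :=
  let cands := (List.range 6).foldl
    (fun acc _ => acc.flatMap (fun v => [(0 : Int), 5].map (fun d => v * 10 + d))) [(0 : Int)]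
  let res := (PySem.List.sorted cands (fun v => v) false).filter (fun v => decide (l ≤ v) && decide (v ≤ r))
  if res.isEmpty then [-1] else res

-- ===== PRECONDITION & SPEC =====
def Spec_solution11 (l : Int) (r : Int) (out : List Int) : Prop := out = solution11_alt l r
instance (l : Int) (r : Int) (out : List Int) : Decidable (Spec_solution11 l r out) := by unfold Spec_solution11; infer_instance

-- ===== CLAIM (what is proved, stated in full; the proofs are below) =====
def Claim_equal_solution11 : Prop := ∀ (l : Int) (r : Int), Dom_solution11 l r → Spec_solution11 l r (solution11 l r)

-- ===== LEMMAS AND PROOFS =====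
-- A's generation list, reversed, is exactly B's sorted candidate list (both closed terms).
theorem solution11_lists_eq :
    (solution11F 6 0 []).reverse =
      PySem.List.sorted ((List.range 6).foldl
        (fun acc _ => acc.flatMap (fun v => [(0 : Int), 5].map (fun d => v * 10 + d))) [(0 : Int)])
        (fun v => v) false := by
  decide

-- ===== VERDICT (by name: the statement is the Claim_ definition above) =====
theorem solution11_spec : Claim_equal_solution11 := by
  intro l r _
  unfold Spec_solution11 solution11 solution11_alt
  simp only [← solution11_lists_eq, ← List.filter_reverse]
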